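-- pv_equiv track=rewrite | github.com/SachinthaMadhushanka/Electric-Panel-Board-Load-Balancing-Project-with-AutoCAD-Integration | Phase2PanelBoard.py | canFitInPanelBoard
-- ===== SOURCE A (Python) =====
-- def canFitInPanelBoard(phase_power, max_spaces):
--     max_length = max(len(lst) for lst in phase_power.values())
--
--     spaces = 0
--     for lst in phase_power.values():
--         if len(lst) == max_length:
--             continue
--         spaces += max_length - len(lst) - 1
--
--     return spaces <= max_spaces
-- ===== SOURCE B (Python) =====
-- def canFitInPanelBoard(phase_power, max_spaces):
--     values = list(phase_power.values())
--     m = len(values[0])   # running max so far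
--     cnt = 1              # how many seen lists have length m
--     others = 0           # how many seen lists are shorter than m
--     spaces = 0           # deficit of the seen lists w.r.t. the running max m
--     for lst in values[1:]:
--         l = len(lst)
--         if l == m:
--             cnt += 1
--         elif l < m:
--             others += 1
--             spaces += m - l - 1
--         else:
--             # new maximum: rebalance all previously seen lists against l
--             spaces += others * (l - m) + cnt * (l - m - 1)
--             others += cnt
--             cnt = 1
--             m = l
--     return spaces <= max_spaces
-- ===== Notes on version B (the rewrite author's own statement) =====
-- stated objective: alternative
-- what changed: Single streaming pass with an online rebalancing state (running max, count at max, count below max, running deficit) that updates the deficit incrementally when a new maximum appears, instead of A's two staged passes (compute max, then accumulate deficits against it).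
import Mathlib
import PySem

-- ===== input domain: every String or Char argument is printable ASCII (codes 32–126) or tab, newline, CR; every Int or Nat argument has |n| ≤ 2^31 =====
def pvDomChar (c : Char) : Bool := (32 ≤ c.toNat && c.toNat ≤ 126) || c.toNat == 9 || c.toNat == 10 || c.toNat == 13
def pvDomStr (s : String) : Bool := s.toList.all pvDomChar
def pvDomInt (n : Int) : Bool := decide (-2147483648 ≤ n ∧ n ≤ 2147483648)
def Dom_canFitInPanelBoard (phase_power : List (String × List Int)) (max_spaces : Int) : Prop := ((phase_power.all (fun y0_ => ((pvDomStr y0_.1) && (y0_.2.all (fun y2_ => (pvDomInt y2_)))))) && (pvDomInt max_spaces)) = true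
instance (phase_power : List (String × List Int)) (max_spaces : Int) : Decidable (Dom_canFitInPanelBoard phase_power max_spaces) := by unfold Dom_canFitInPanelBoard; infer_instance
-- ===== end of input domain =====

-- B makes a single streaming pass with an online rebalancing state (running max, count at max, count below, running deficit) instead of A's two staged passes (max first, then deficit loop); same cost, different decomposition. Pre_ excludes the empty dict (A raises ValueError there).


-- ===== PORT A =====
def canFitInPanelBoard (phase_power : List (String × List Int)) (max_spaces : Int) : Bool :=
  match PySem.List.max? (phase_power.map fun kv => (kv.2.length : Int)) (fun x => x) with
  | none => false  -- Python raises ValueError on an empty dict; excluded by Pre_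
  | some max_length =>
    let spaces := phase_power.foldl
      (fun acc kv => if (kv.2.length : Int) = max_length then acc else acc + (max_length - (kv.2.length : Int) - 1))
      (0 : Int)
    decide (spaces ≤ max_spaces)

-- ===== PORT B =====
-- the loop body of Source B: state (m, cnt, others, spaces)
def pvStepB (st : Int × Int × Int × Int) (l : Int) : Int × Int × Int × Int :=
  match st with
  | (m, cnt, others, spaces) =>
    if l = m then (m, cnt + 1, others, spaces)
    else if l < m then (m, cnt, others + 1, spaces + (m - l - 1))
    else (l, 1, others + cnt, spaces + others * (l - m) + cnt * (l - m - 1))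

def canFitInPanelBoard_alt (phase_power : List (String × List Int)) (max_spaces : Int) : Bool :=
  match phase_power with
  | [] => false  -- values[0] raises IndexError on an empty dict; excluded by Pre_
  | kv :: rest =>
    let st := rest.foldl (fun st kv2 => pvStepB st (kv2.2.length : Int))
      ((kv.2.length : Int), 1, 0, 0)
    decide (st.2.2.2 ≤ max_spaces)

-- ===== PRECONDITION & SPEC =====
-- Pre_ excludes the empty dict, on which A's max(...) raises ValueError.
def Pre_canFitInPanelBoard (phase_power : List (String × List Int)) (max_spaces : Int) : Prop := phase_power ≠ []
instance (phase_power : List (String × List Int)) (max_spaces : Int) : Decidable (Pre_canFitInPanelBoard phase_power max_spaces) := by unfold Pre_canFitInPanelBoard; infer_instance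
def pvWitness_canFitInPanelBoard : (List (String × List Int)) × Int := ([("a", [1])], 0)

def Spec_canFitInPanelBoard (phase_power : List (String × List Int)) (max_spaces : Int) (out : Bool) : Prop := out = canFitInPanelBoard_alt phase_power max_spaces
instance (phase_power : List (String × List Int)) (max_spaces : Int) (out : Bool) : Decidable (Spec_canFitInPanelBoard phase_power max_spaces out) := by unfold Spec_canFitInPanelBoard; infer_instance

-- ===== CLAIM =====
def Claim_equal_canFitInPanelBoard : Prop := ∀ (phase_power : List (String × List Int)) (max_spaces : Int), Dom_canFitInPanelBoard phase_power max_spaces → Pre_canFitInPanelBoard phase_power max_spaces → Spec_canFitInPanelBoard phase_power max_spaces (canFitInPanelBoard phase_power max_spaces)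

-- ===== LEMMAS AND PROOFS =====

/-- A's branching accumulator over a list of lengths equals the closed form n*M - sum - n + count M. -/
theorem pv_fold_closed (M : Int) : ∀ (ls : List Int) (acc : Int),
    ls.foldl (fun a l => if l = M then a else a + (M - l - 1)) acc
      = acc + (ls.length : Int) * M - ls.sum - (ls.length : Int) + (ls.count M : Int) := by
  intro ls
  induction ls with
  | nil => intro acc; simp
  | cons l t ih =>
    intro acc
    simp only [List.foldl_cons, List.count_cons, List.sum_cons, List.length_cons]
    rw [ih]
    by_cases h : l = M
    · simp [h]; ring
    · have : (l == M) = false := by simp [h]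
      simp [h, this]; ring

/-- Streaming invariant of B's loop: relative to the already-seen lengths `S`,
    the state holds the max, the count at the max, and the closed-form deficit. -/
theorem pv_stream_inv : ∀ (ls S : List Int) (m cnt others spaces : Int),
    (∀ x ∈ S, x ≤ m) → m ∈ S → cnt = (S.count m : Int) →
    others = (S.length : Int) - cnt →
    spaces = (S.length : Int) * m - S.sum - (S.length : Int) + cnt →
    (∀ x ∈ S ++ ls, x ≤ (ls.foldl pvStepB (m, cnt, others, spaces)).1) ∧
    (ls.foldl pvStepB (m, cnt, others, spaces)).1 ∈ S ++ ls ∧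
    (ls.foldl pvStepB (m, cnt, others, spaces)).2.1
      = (((S ++ ls).count (ls.foldl pvStepB (m, cnt, others, spaces)).1 : Nat) : Int) ∧
    (ls.foldl pvStepB (m, cnt, others, spaces)).2.2.2
      = ((S ++ ls).length : Int) * (ls.foldl pvStepB (m, cnt, others, spaces)).1
        - (S ++ ls).sum - ((S ++ ls).length : Int)
        + (ls.foldl pvStepB (m, cnt, others, spaces)).2.1 := by
  intro ls
  induction ls with
  | nil =>
    intro S m cnt others spaces hmax hmem hcnt hoth hsp
    simpa using ⟨hmax, hmem, hcnt, hsp⟩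
  | cons l t ih =>
    intro S m cnt others spaces hmax hmem hcnt hoth hsp
    subst hsp; subst hoth; subst hcnt
    have hassoc : S ++ l :: t = (S ++ [l]) ++ t := by simp
    rw [List.foldl_cons, hassoc]
    by_cases h1 : l = m
    · subst h1
      rw [show pvStepB (l, (List.count l S : Int), (S.length : Int) - (List.count l S : Int), (S.length : Int) * l - S.sum - (S.length : Int) + (List.count l S : Int)) l = (l, (List.count l S : Int) + 1, (S.length : Int) - (List.count l S : Int), (S.length : Int) * l - S.sum - (S.length : Int) + (List.count l S : Int)) from by simp [pvStepB]]
      refine ih (S ++ [l]) l _ _ _ ?_ ?_ ?_ ?_ ?_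
      · intro x hx
        rcases List.mem_append.mp hx with hx | hx
        · exact hmax x hx
        · simp at hx; omega
      · exact List.mem_append.mpr (Or.inl hmem)
      · simp [List.count_append]
      · simp [List.length_append]
      · simp [List.length_append, List.sum_append]; push_cast; ring
    · by_cases h2 : l < m
      · rw [show pvStepB (m, (List.count m S : Int), (S.length : Int) - (List.count m S : Int), (S.length : Int) * m - S.sum - (S.length : Int) + (List.count m S : Int)) l = (m, (List.count m S : Int), (S.length : Int) - (List.count m S : Int) + 1, ((S.length : Int) * m - S.sum - (S.length : Int) + (List.count m S : Int)) + (m - l - 1)) from by simp [pvStepB, h1, h2]]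
        refine ih (S ++ [l]) m _ _ _ ?_ ?_ ?_ ?_ ?_
        · intro x hx
          rcases List.mem_append.mp hx with hx | hx
          · exact hmax x hx
          · simp at hx; omega
        · exact List.mem_append.mpr (Or.inl hmem)
        · simp [List.count_append, h1]
        · simp [List.length_append]; omega
        · simp [List.length_append, List.sum_append]; push_cast; ring
      · -- l > m : new maximum
        have hgt : m < l := by omega
        rw [show pvStepB (m, (List.count m S : Int), (S.length : Int) - (List.count m S : Int), (S.length : Int) * m - S.sum - (S.length : Int) + (List.count m S : Int)) l = (l, 1, ((S.length : Int) - (List.count m S : Int)) + (List.count m S : Int), ((S.length : Int) * m - S.sum - (S.length : Int) + (List.count m S : Int)) + ((S.length : Int) - (List.count m S : Int)) * (l - m) + (List.count m S : Int) * (l - m - 1)) from by simp [pvStepB, h1, h2]]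
        have hcount0 : S.count l = 0 := by
          refine List.count_eq_zero.mpr (fun hl => ?_)
          have := hmax l hl; omega
        refine ih (S ++ [l]) l _ _ _ ?_ ?_ ?_ ?_ ?_
        · intro x hx
          rcases List.mem_append.mp hx with hx | hx
          · have := hmax x hx; omega
          · simp at hx; omega
        · exact List.mem_append.mpr (Or.inr (by simp))
        · simp [List.count_append, hcount0]
        · simp [List.length_append]
        · simp [List.length_append, List.sum_append]
          push_cast; ring

-- ===== VERDICT =====
theorem canFitInPanelBoard_spec : Claim_equal_canFitInPanelBoard := by
  intro pp ms _ hpre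
  unfold Spec_canFitInPanelBoard canFitInPanelBoard canFitInPanelBoard_alt
  match pp with
  | [] => exact absurd rfl hpre
  | kv :: rest =>
    have hinv := pv_stream_inv (rest.map fun kv2 => (kv2.2.length : Int))
      [(kv.2.length : Int)] (kv.2.length : Int) 1 0 0
      (by simp) (by simp) (by simp) (by simp) (by simp)
    have hfold : rest.foldl (fun st kv2 => pvStepB st (kv2.2.length : Int))
        ((kv.2.length : Int), 1, 0, 0)
        = (rest.map fun kv2 => (kv2.2.length : Int)).foldl pvStepB
          ((kv.2.length : Int), 1, 0, 0) := by rw [List.foldl_map]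
    obtain ⟨hbmax, hbmem, hbcnt, hbsp⟩ := hinv
    cases hM : PySem.List.max? ((kv :: rest).map fun kv2 => (kv2.2.length : Int)) (fun x => x) with
    | none =>
      simp only [List.map_cons, PySem.List.max?_id_cons] at hM
      exact absurd hM (by simp)
    | some M =>
      have hMmem : M ∈ (kv :: rest).map fun kv2 => (kv2.2.length : Int) :=
        PySem.List.max?_mem hM
      have hMmax : ∀ y ∈ (kv :: rest).map fun kv2 => (kv2.2.length : Int), y ≤ M :=
        PySem.List.max?_isMax hM
      set st := (rest.map fun kv2 => (kv2.2.length : Int)).foldl pvStepB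
        ((kv.2.length : Int), 1, 0, 0) with hst
      have hset : ([(kv.2.length : Int)] ++ rest.map fun kv2 => (kv2.2.length : Int))
          = (kv :: rest).map fun kv2 => (kv2.2.length : Int) := by simp
      rw [hset] at hbmax hbmem hbcnt hbsp
      have hMeq : M = st.1 :=
        le_antisymm (hbmax M hMmem) (hMmax st.1 hbmem)
      have hAfold : (kv :: rest).foldl
          (fun acc kv2 => if ((kv2.2.length : Int)) = M then acc else acc + (M - (kv2.2.length : Int) - 1)) (0 : Int)
          = ((kv :: rest).map fun kv2 => (kv2.2.length : Int)).foldl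
            (fun a l => if l = M then a else a + (M - l - 1)) 0 := by
        rw [List.foldl_map]
      simp only [hfold]
      rw [hAfold, pv_fold_closed, hMeq, hbsp, hbcnt]
      simp
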